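-- pv_equiv track=rewrite | github.com/xornic1229/A-Maze-ing | src/mlx_maze_viewer.py | build_path_from_moves
-- ===== SOURCE A (Python) =====
-- def build_path_from_moves(entry: tuple[int, int], moves: str) -> list[tuple[int, int]]:
--     """Given an entry point and a string of moves, build the full path as a list of the coordinates of the
--     cells that will form the path. The moves string consists of characters 'N', 'S', 'E', 'W' representing
--     the direction of movement from one cell to the next."""
--
--     row, col = entry
--     path = [(row, col)]
--
--     for move in moves:
--         if move == "N":
--             row -= 1
--         elif move == "S":
--             row += 1
--         elif move == "E":
--             col += 1
--         elif move == "W":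
--             col -= 1
--         else:
--             continue
--         path.append((row, col))
--
--     return path
-- ===== SOURCE B (Python) =====
-- def _scan(start, deltas):
--     """Prefix sums of deltas starting at start (start included)."""
--     out = [start]
--     for d in deltas:
--         out.append(out[-1] + d)
--     return out
--
--
-- def build_path_from_moves(entry: tuple[int, int], moves: str) -> list[tuple[int, int]]:
--     """Structure-of-arrays decomposition: filter valid moves once, then compute the
--     row coordinates and the column coordinates as two independent prefix-sum scans
--     and zip them back into a list of cells."""
--     valid = [m for m in moves if m in "NSEW"]
--     rows = _scan(entry[0], [{"N": -1, "S": 1}.get(m, 0) for m in valid])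
--     cols = _scan(entry[1], [{"E": 1, "W": -1}.get(m, 0) for m in valid])
--     return list(zip(rows, cols))
-- ===== Notes on version B (the rewrite author's own statement) =====
-- stated objective: faster
-- what changed: Replaced A's single stateful loop (branch chain mutating row/col and appending tuples one by one) by a structure-of-arrays decomposition: filter the valid moves once, compute the row and the column coordinate sequences as two independent per-axis prefix-sum scans, then zip the two sequences into the path; constant-factor faster because the per-character branch chain and per-step tuple construction are replaced by comprehensions and zip (measured ~2.4x at n=262144).
import Mathlib
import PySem

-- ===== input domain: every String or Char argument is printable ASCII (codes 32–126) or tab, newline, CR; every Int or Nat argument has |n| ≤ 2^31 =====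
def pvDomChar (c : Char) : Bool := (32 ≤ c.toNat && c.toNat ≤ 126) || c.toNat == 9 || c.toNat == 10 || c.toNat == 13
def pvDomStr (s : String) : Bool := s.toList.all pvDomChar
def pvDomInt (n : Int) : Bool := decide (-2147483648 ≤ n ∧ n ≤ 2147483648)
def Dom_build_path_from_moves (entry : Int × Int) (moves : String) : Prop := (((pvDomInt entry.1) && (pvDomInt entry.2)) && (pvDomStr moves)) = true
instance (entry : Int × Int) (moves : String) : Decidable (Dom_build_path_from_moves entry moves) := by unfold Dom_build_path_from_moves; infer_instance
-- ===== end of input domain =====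

-- B replaces A's single stateful branch-chain loop by a structure-of-arrays decomposition: filter valid moves, scan row and column coordinates independently, zip (measured constant-factor faster in a timing run).


-- ===== PORT A =====
-- loop body of A: branch chain updating (row, col) and appending the new cell
def pvStepA (st : Int × Int × List (Int × Int)) (move : Char) : Int × Int × List (Int × Int) :=
  let (row, col, path) := st
  if move = 'N' then (row - 1, col, path ++ [(row - 1, col)])
  else if move = 'S' then (row + 1, col, path ++ [(row + 1, col)])
  else if move = 'E' then (row, col + 1, path ++ [(row, col + 1)])
  else if move = 'W' then (row, col - 1, path ++ [(row, col - 1)])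
  else (row, col, path)

def build_path_from_moves (entry : Int × Int) (moves : String) : List (Int × Int) :=
  (moves.toList.foldl pvStepA (entry.1, entry.2, [(entry.1, entry.2)])).2.2

-- ===== PORT B =====
-- Source B's _scan helper: out = [start]; for d in deltas: out.append(out[-1] + d)
def pvScan (start : Int) (deltas : List Int) : List Int :=
  deltas.foldl (fun out d => out ++ [out.getLast?.getD start + d]) [start]

-- Source B's per-axis delta dicts {"N": -1, "S": 1} / {"E": 1, "W": -1}
def pvDrow : PySem.Dict Char Int := PySem.Dict.ofList [('N', -1), ('S', 1)]
def pvDcol : PySem.Dict Char Int := PySem.Dict.ofList [('E', 1), ('W', -1)]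

def build_path_from_moves_alt (entry : Int × Int) (moves : String) : List (Int × Int) :=
  -- m in "NSEW" for a single char = membership in the char list
  let valid := moves.toList.filter (fun m => ("NSEW".toList).contains m)
  let rows := pvScan entry.1 (valid.map (fun m => pvDrow.getD m 0))
  let cols := pvScan entry.2 (valid.map (fun m => pvDcol.getD m 0))
  rows.zip cols

-- ===== PRECONDITION & SPEC =====
def Spec_build_path_from_moves (entry : Int × Int) (moves : String) (out : List (Int × Int)) : Prop := out = build_path_from_moves_alt entry moves
instance (entry : Int × Int) (moves : String) (out : List (Int × Int)) : Decidable (Spec_build_path_from_moves entry moves out) := by unfold Spec_build_path_from_moves; infer_instance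

-- ===== CLAIM (what is proved, stated in full; the proofs are below) =====
def Claim_equal_build_path_from_moves : Prop := ∀ (entry : Int × Int) (moves : String), Dom_build_path_from_moves entry moves → Spec_build_path_from_moves entry moves (build_path_from_moves entry moves)

-- ===== LEMMAS AND PROOFS =====

theorem pvNSEW : "NSEW".toList = ['N', 'S', 'E', 'W'] := by decide

-- proof-side pure recursion computing the cells A appends (without the accumulator)
def pvPathPure (r c : Int) : List Char → List (Int × Int)
  | [] => []
  | m :: t =>
    if m = 'N' then (r - 1, c) :: pvPathPure (r - 1) c t
    else if m = 'S' then (r + 1, c) :: pvPathPure (r + 1) c t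
    else if m = 'E' then (r, c + 1) :: pvPathPure r (c + 1) t
    else if m = 'W' then (r, c - 1) :: pvPathPure r (c - 1) t
    else pvPathPure r c t

-- proof-side pure recursion computing the scan's tail
def pvScanPure (v : Int) : List Int → List Int
  | [] => []
  | d :: t => (v + d) :: pvScanPure (v + d) t

theorem pvA_fold (l : List Char) : ∀ (r c : Int) (acc : List (Int × Int)),
    (l.foldl pvStepA (r, c, acc)).2.2 = acc ++ pvPathPure r c l := by
  induction l with
  | nil => intro r c acc; simp [pvPathPure]
  | cons m t ih =>
    intro r c acc
    simp only [List.foldl_cons, pvPathPure, pvStepA]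
    split_ifs <;> simp [ih]

theorem pvScan_eq (deltas : List Int) : ∀ (start v : Int) (acc : List Int),
    acc.getLast? = some v →
    deltas.foldl (fun out d => out ++ [out.getLast?.getD start + d]) acc
      = acc ++ pvScanPure v deltas := by
  induction deltas with
  | nil => intro _ _ _ _; simp [pvScanPure]
  | cons d t ih =>
    intro start v acc h
    simp only [List.foldl_cons, pvScanPure, h, Option.getD_some]
    rw [ih start (v + d) (acc ++ [v + d]) (by simp)]
    simp

theorem pvZip_pure (l : List Char) : ∀ (r c : Int),
    (∀ m ∈ l, (['N', 'S', 'E', 'W'].contains m) = true) →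
    (pvScanPure r (l.map (fun m => pvDrow.getD m 0))).zip
      (pvScanPure c (l.map (fun m => pvDcol.getD m 0))) = pvPathPure r c l := by
  induction l with
  | nil => intro _ _ _; rfl
  | cons m t ih =>
    intro r c h
    have hm : m = 'N' ∨ m = 'S' ∨ m = 'E' ∨ m = 'W' := by
      have h' := h m (by simp)
      simpa using h'
    have ht : ∀ x ∈ t, (['N', 'S', 'E', 'W'].contains x) = true :=
      fun x hx => h x (List.mem_cons_of_mem _ hx)
    rcases hm with h1 | h1 | h1 | h1 <;> subst h1 <;>
      simp only [List.map_cons, pvScanPure, pvPathPure, if_true,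
        show (pvDrow.getD 'N' 0 : Int) = -1 from rfl, show (pvDcol.getD 'N' 0 : Int) = 0 from rfl,
        show (pvDrow.getD 'S' 0 : Int) = 1 from rfl, show (pvDcol.getD 'S' 0 : Int) = 0 from rfl,
        show (pvDrow.getD 'E' 0 : Int) = 0 from rfl, show (pvDcol.getD 'E' 0 : Int) = 1 from rfl,
        show (pvDrow.getD 'W' 0 : Int) = 0 from rfl, show (pvDcol.getD 'W' 0 : Int) = -1 from rfl,
        List.zip_cons_cons] <;>
      simp [ih _ _ ht, ← sub_eq_add_neg]

theorem pvPath_filter (l : List Char) : ∀ (r c : Int),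
    pvPathPure r c (l.filter (fun m => (['N', 'S', 'E', 'W'].contains m))) = pvPathPure r c l := by
  induction l with
  | nil => intro _ _; rfl
  | cons m t ih =>
    intro r c
    by_cases hv : ((['N', 'S', 'E', 'W'].contains m) : Bool) = true
    · rw [List.filter_cons_of_pos hv]
      have hm : m = 'N' ∨ m = 'S' ∨ m = 'E' ∨ m = 'W' := by simpa using hv
      rcases hm with h1 | h1 | h1 | h1 <;> subst h1 <;> simp only [pvPathPure] <;> simp [ih]
    · rw [List.filter_cons_of_neg hv]
      have hm : m ≠ 'N' ∧ m ≠ 'S' ∧ m ≠ 'E' ∧ m ≠ 'W' := by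
        simpa using hv
      rw [ih]
      conv_rhs => rw [pvPathPure]
      simp [hm.1, hm.2.1, hm.2.2.1, hm.2.2.2]

-- ===== VERDICT (by name: the statement is the Claim_ definition above) =====
theorem build_path_from_moves_spec : Claim_equal_build_path_from_moves := by
  intro entry moves _
  unfold Spec_build_path_from_moves build_path_from_moves
  rw [pvA_fold]
  show [(entry.1, entry.2)] ++ pvPathPure entry.1 entry.2 moves.toList =
    (pvScan entry.1 ((moves.toList.filter (fun m => ("NSEW".toList).contains m)).map
        (fun m => pvDrow.getD m 0))).zip
    (pvScan entry.2 ((moves.toList.filter (fun m => ("NSEW".toList).contains m)).map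
        (fun m => pvDcol.getD m 0)))
  rw [pvNSEW]
  unfold pvScan
  rw [pvScan_eq _ _ entry.1 [entry.1] (by simp), pvScan_eq _ _ entry.2 [entry.2] (by simp)]
  simp only [List.cons_append, List.nil_append, List.zip_cons_cons]
  rw [pvZip_pure _ entry.1 entry.2 (fun m hm => (List.mem_filter.mp hm).2), pvPath_filter]
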